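-- pv_equiv track=rewrite | github.com/leejohy-0223/python-solve | python/algorithm_study/boj16968.py | solution
-- ===== SOURCE A (Python) =====
-- def solution(strings):
--     if strings == '':
--         return 0
--
--     numCount, charCount = 10, 26
--     answer = 1
--     before = ''
--
--     for string in strings:
--         if string == 'c':
--             answer = answer * charCount if before != string else answer * (charCount - 1)
--         else:
--             answer = answer * numCount if before != string else answer * (numCount - 1)
--         before = string
--     return answer
-- ===== SOURCE B (Python) =====
-- def solution(strings):
--     if strings == '':
--         return 0
--     c = strings.count('c')
--     pairs = list(zip(strings, strings[1:]))
--     rc = sum(1 for a, b in pairs if a == b == 'c')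
--     rn = sum(1 for a, b in pairs if a == b != 'c')
--     return 26 ** (c - rc) * 25 ** rc * 10 ** (len(strings) - c - rn) * 9 ** rn
-- ===== Notes on version B (the rewrite author's own statement) =====
-- stated objective: alternative
-- what changed: B drops A's sequential running product and 'before' state entirely: it counts the 'c' characters and the adjacent equal pairs (via zip with the shifted string) and returns one closed-form power product 26^(c-rc) * 25^rc * 10^(n-c-rn) * 9^rn.
import Mathlib
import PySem

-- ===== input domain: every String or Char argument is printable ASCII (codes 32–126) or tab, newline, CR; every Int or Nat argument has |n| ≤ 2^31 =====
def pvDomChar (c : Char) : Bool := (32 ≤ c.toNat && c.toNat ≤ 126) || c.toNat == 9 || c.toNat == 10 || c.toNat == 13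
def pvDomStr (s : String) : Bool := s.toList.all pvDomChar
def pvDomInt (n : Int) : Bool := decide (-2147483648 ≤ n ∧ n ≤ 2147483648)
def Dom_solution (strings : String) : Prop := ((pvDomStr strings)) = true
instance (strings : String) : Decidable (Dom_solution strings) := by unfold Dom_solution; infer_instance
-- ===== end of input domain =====

-- B replaces A's sequential running product by a closed-form power formula over four
-- counts (number of 'c's and adjacent equal pairs); same O(n) cost, different algorithm.

-- ===== PORT A =====
-- Python's `before` starts as the empty string '' and afterwards always holds the last
-- one-character string; we model it as Option Char (none = ''), exact since '' never
-- equals a one-character string.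
def solution (strings : String) : Int :=
  if strings = "" then 0
  else
    let numCount : Int := 10
    let charCount : Int := 26
    (strings.toList.foldl
      (fun (st : Int × Option Char) (c : Char) =>
        let answer := st.1
        let before := st.2
        if c = 'c' then
          (if before ≠ some c then answer * charCount else answer * (charCount - 1), some c)
        else
          (if before ≠ some c then answer * numCount else answer * (numCount - 1), some c))
      (1, none)).1

-- ===== PORT B =====
-- Source B: count 'c' characters, and count adjacent equal pairs (zip of the string with
-- its tail) that are 'c'/non-'c'; return one power product. Nat subtraction is exact
-- here because rc ≤ c and rn ≤ len - c (each pair is counted at its second position).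
def solution_alt (strings : String) : Int :=
  if strings = "" then 0
  else
    let l := strings.toList
    let c : Nat := l.count 'c'
    let pairs := l.zip l.tail
    let rc : Nat := pairs.countP (fun p => p.1 = p.2 ∧ p.2 = 'c')
    let rn : Nat := pairs.countP (fun p => p.1 = p.2 ∧ p.2 ≠ 'c')
    (26 : Int) ^ (c - rc) * 25 ^ rc * 10 ^ (l.length - c - rn) * 9 ^ rn

-- ===== PRECONDITION & SPEC =====
def Spec_solution (strings : String) (out : Int) : Prop := out = solution_alt strings
instance (strings : String) (out : Int) : Decidable (Spec_solution strings out) := by unfold Spec_solution; infer_instance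

-- ===== CLAIM (what is proved, stated in full; the proofs are below) =====
def Claim_equal_solution : Prop := ∀ (strings : String), Dom_solution strings → Spec_solution strings (solution strings)

-- ===== LEMMAS AND PROOFS =====

def pvCnt (c : Char) : Int := if c = 'c' then 26 else 10

-- the product A's loop computes, with `before = some b` (or none at the start)
def pvG : List Char → Option Char → Int
  | [], _ => 1
  | c :: rest, b => (if b ≠ some c then pvCnt c else pvCnt c - 1) * pvG rest (some c)

def pvStepA : Int × Option Char → Char → Int × Option Char :=
  fun st c =>
    let answer := st.1
    let before := st.2
    if c = 'c' then
      (if before ≠ some c then answer * 26 else answer * (26 - 1), some c)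
    else
      (if before ≠ some c then answer * 10 else answer * (10 - 1), some c)

lemma foldA_eq_g : ∀ (l : List Char) (a : Int) (b : Option Char),
    (l.foldl pvStepA (a, b)).1 = a * pvG l b := by
  intro l
  induction l with
  | nil => intro a b; simp [pvG]
  | cons c rest ih =>
    intro a b
    by_cases hc : c = 'c' <;> by_cases hb : b ≠ some c <;>
      simp [pvStepA, pvG, pvCnt, hc, hb, ih, List.foldl, mul_assoc]

-- recursive counts relative to a previous char b:
-- new/repeated 'c's, repeated non-'c's
def pvNC (b : Char) : List Char → Nat
  | [] => 0
  | c :: t => (if c = 'c' ∧ b ≠ c then 1 else 0) + pvNC c t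
def pvRC (b : Char) : List Char → Nat
  | [] => 0
  | c :: t => (if b = c ∧ c = 'c' then 1 else 0) + pvRC c t
def pvRN (b : Char) : List Char → Nat
  | [] => 0
  | c :: t => (if b = c ∧ c ≠ 'c' then 1 else 0) + pvRN c t

lemma pvRN_le : ∀ (l : List Char) (b : Char),
    pvRN b l + l.count 'c' ≤ l.length := by
  intro l
  induction l with
  | nil => intro b; simp [pvRN]
  | cons c t ih =>
    intro b
    have h := ih c
    by_cases hc : c = 'c'
    · subst hc
      simp [pvRN]
      omega
    · by_cases hb : b = c <;>
        simp [pvRN, hb, hc] <;> omega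

lemma pvG_closed : ∀ (l : List Char) (b : Char),
    pvG l (some b)
      = 26 ^ pvNC b l * 25 ^ pvRC b l
        * 10 ^ (l.length - l.count 'c' - pvRN b l) * 9 ^ pvRN b l := by
  intro l
  induction l with
  | nil => intro b; simp [pvG, pvNC, pvRC, pvRN]
  | cons c t ih =>
    intro b
    have hlenc : t.count 'c' ≤ t.length := List.count_le_length
    have hrn := pvRN_le t c
    simp only [pvG, pvNC, pvRC, pvRN, ih, List.length_cons, List.count_cons]
    by_cases hc : c = 'c'
    · subst hc
      by_cases hb : b = 'c'
      · subst hb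
        simp [pvCnt]
        rw [pow_add, pow_one]
        ring
      · simp [pvCnt, hb]
        rw [pow_add, pow_one]
        ring
    · by_cases hb : b = c
      · subst hb
        simp [pvCnt, hc]
        rw [show t.length + 1 - t.count 'c' - (1 + pvRN b t)
              = t.length - t.count 'c' - pvRN b t from by omega,
            pow_add, pow_one]
        ring
      · simp [pvCnt, hc, hb]
        rw [show t.length + 1 - t.count 'c' - pvRN c t
              = (t.length - t.count 'c' - pvRN c t) + 1 from by omega,
            pow_add, pow_one]
        ring

-- each 'c' after position 0 is either new or repeated
lemma nc_add_rc : ∀ (l : List Char) (b : Char),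
    pvNC b l + pvRC b l = l.count 'c' := by
  intro l
  induction l with
  | nil => intro b; simp [pvNC, pvRC]
  | cons c t ih =>
    intro b
    have h := ih c
    by_cases hc : c = 'c'
    · subst hc
      by_cases hb : b = 'c'
      · subst hb; simp [pvNC, pvRC]; try omega
      · simp [pvNC, pvRC, hb]; try omega
    · by_cases hb : b = c
      · subst hb; simp [pvNC, pvRC, hc]; try omega
      · simp [pvNC, pvRC, hc, hb]; try omega

-- zip-countP of Source B equals the recursive counts, with previous char b prepended
lemma zip_rc : ∀ (l : List Char) (b : Char),
    ((b :: l).zip l).countP (fun p => p.1 = p.2 ∧ p.2 = 'c') = pvRC b l := by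
  intro l
  induction l with
  | nil => intro b; simp [pvRC]
  | cons c t ih =>
    intro b
    simp only [List.zip_cons_cons, List.countP_cons, pvRC, ih c]
    by_cases hb : b = c <;> by_cases hc : c = 'c' <;> (simp [hb, hc]; try omega)

lemma zip_rn : ∀ (l : List Char) (b : Char),
    ((b :: l).zip l).countP (fun p => p.1 = p.2 ∧ p.2 ≠ 'c') = pvRN b l := by
  intro l
  induction l with
  | nil => intro b; simp [pvRN]
  | cons c t ih =>
    intro b
    simp only [List.zip_cons_cons, List.countP_cons, pvRN, ih c]
    by_cases hb : b = c <;> by_cases hc : c = 'c' <;> (simp [hb, hc]; try omega)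

lemma main_eq : ∀ (c : Char) (t : List Char),
    pvG (c :: t) none
      = (26 : Int) ^ ((c :: t).count 'c' - ((c :: t).zip t).countP (fun p => p.1 = p.2 ∧ p.2 = 'c'))
        * 25 ^ (((c :: t).zip t).countP (fun p => p.1 = p.2 ∧ p.2 = 'c'))
        * 10 ^ ((c :: t).length - (c :: t).count 'c' - ((c :: t).zip t).countP (fun p => p.1 = p.2 ∧ p.2 ≠ 'c'))
        * 9 ^ (((c :: t).zip t).countP (fun p => p.1 = p.2 ∧ p.2 ≠ 'c')) := by
  intro c t
  rw [zip_rc, zip_rn]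
  have hnc := nc_add_rc t c
  have hrn := pvRN_le t c
  have hlenc : t.count 'c' ≤ t.length := List.count_le_length
  show (if (none : Option Char) ≠ some c then pvCnt c else pvCnt c - 1) * pvG t (some c) = _
  rw [pvG_closed, if_pos (by simp)]
  by_cases hc : c = 'c'
  · subst hc
    simp [pvCnt]
    rw [show t.count 'c' + 1 - pvRC 'c' t = pvNC 'c' t + 1 from by omega,
        pow_add, pow_one]
    ring
  · simp [pvCnt, hc]
    rw [show t.count 'c' - pvRC c t = pvNC c t from by omega,
        show t.length + 1 - t.count 'c' - pvRN c t
          = (t.length - t.count 'c' - pvRN c t) + 1 from by omega,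
        pow_add, pow_one]
    ring

-- ===== VERDICT (by name: the statement is the Claim_ definition above) =====
theorem solution_spec : Claim_equal_solution := by
  intro s _
  unfold Spec_solution solution solution_alt
  by_cases h : s = ""
  · simp [h]
  · simp only [if_neg h]
    have hl : s.toList ≠ [] := by
      simpa [String.toList_eq_nil_iff] using h
    obtain ⟨c, t, hct⟩ := List.exists_cons_of_ne_nil hl
    rw [hct]
    show (List.foldl pvStepA (1, none) (c :: t)).1 = _
    rw [foldA_eq_g, one_mul]
    have := main_eq c t
    simpa [List.tail] using this
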